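-- pv_equiv track=rewrite | github.com/FBW-JNU/RGS | clustering/bi_kmeans.py | find_min_bro
-- ===== SOURCE A (Python) =====
-- def find_min_bro(lists):
--     k = len(lists[0])
--     n = len(lists)
--
--     result_index = []
--     result = []
--     for i in range(k):
--         min_index = 0
--         min_value = lists[0][i]
--
--         for j in range(1, n):
--             if lists[j][i] < min_value:
--                 min_index = j
--                 min_value = lists[j][i]
--
--         result_index.append(min_index)
--         result.append(min_value)
--
--     return result_index, result
-- ===== SOURCE B (Python) =====
-- def find_min_bro(lists):
--     best = [(0, v) for v in lists[0]]
--     for j, row in enumerate(lists[1:], 1):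
--         best = [(j, v) if v < b[1] else b for b, v in zip(best, row)]
--     return [b[0] for b in best], [b[1] for b in best]
-- ===== Notes on version B (the rewrite author's own statement) =====
-- stated objective: alternative
-- what changed: B streams the matrix row by row, maintaining one list of (argmin-row, min-value) pairs updated columnwise via zip, instead of A's column-by-column scan with nested index loops.
import Mathlib
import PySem

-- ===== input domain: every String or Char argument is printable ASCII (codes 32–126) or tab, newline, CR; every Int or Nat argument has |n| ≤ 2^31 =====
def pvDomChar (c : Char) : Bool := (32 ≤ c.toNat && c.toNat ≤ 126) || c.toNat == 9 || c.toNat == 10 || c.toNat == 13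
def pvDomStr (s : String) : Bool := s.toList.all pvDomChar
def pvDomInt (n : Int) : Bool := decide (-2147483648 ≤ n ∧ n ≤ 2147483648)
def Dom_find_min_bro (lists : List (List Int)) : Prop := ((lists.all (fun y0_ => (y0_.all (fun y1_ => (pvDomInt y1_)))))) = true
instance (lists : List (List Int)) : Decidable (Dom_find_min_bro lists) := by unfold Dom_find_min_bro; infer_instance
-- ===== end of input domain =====

-- B streams the matrix row by row with one list of (argmin,min) pairs instead of A's column-by-column nested scans; same cost, different decomposition.


-- ===== PORT A =====
def find_min_bro (lists : List (List Int)) : List Int × List Int :=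
  let k : Int := (PySem.List.pyGetD lists 0 []).length
  let n : Int := lists.length
  (PySem.List.pyRange 0 k 1).foldl (fun (acc : List Int × List Int) i =>
    let p : Int × Int :=
      (PySem.List.pyRange 1 n 1).foldl (fun (s : Int × Int) j =>
        if PySem.List.pyGetD (PySem.List.pyGetD lists j []) i 0 < s.2 then
          (j, PySem.List.pyGetD (PySem.List.pyGetD lists j []) i 0)
        else s)
        (0, PySem.List.pyGetD (PySem.List.pyGetD lists 0 []) i 0)
    (acc.1 ++ [p.1], acc.2 ++ [p.2])) ([], [])

-- ===== PORT B =====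
def find_min_bro_alt (lists : List (List Int)) : List Int × List Int :=
  let best0 : List (Int × Int) := (PySem.List.pyGetD lists 0 []).map (fun v => ((0 : Int), v))
  let best := (PySem.List.enumerate (PySem.List.slice lists (some 1) none) 1).foldl
    (fun (best : List (Int × Int)) jr =>
      (best.zip jr.2).map (fun p => if p.2 < p.1.2 then (jr.1, p.2) else p.1)) best0
  (best.map (·.1), best.map (·.2))

-- ===== PRECONDITION & SPEC =====
-- Pre_ excludes exactly the inputs where A raises IndexError: the empty list (lists[0]) and
-- matrices with some row shorter than the first row (lists[j][i]).
def Pre_find_min_bro (lists : List (List Int)) : Prop :=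
  lists ≠ [] ∧ ∀ row ∈ lists, (lists.headD []).length ≤ row.length
instance (lists : List (List Int)) : Decidable (Pre_find_min_bro lists) := by
  unfold Pre_find_min_bro; infer_instance
def pvWitness_find_min_bro : List (List Int) := [[1, 2], [3, 0]]
def Spec_find_min_bro (lists : List (List Int)) (out : List Int × List Int) : Prop := out = find_min_bro_alt lists
instance (lists : List (List Int)) (out : List Int × List Int) : Decidable (Spec_find_min_bro lists out) := by unfold Spec_find_min_bro; infer_instance

-- ===== CLAIM (what is proved, stated in full; the proofs are below) =====
def Claim_equal_find_min_bro : Prop := ∀ (lists : List (List Int)), Dom_find_min_bro lists → Pre_find_min_bro lists → Spec_find_min_bro lists (find_min_bro lists)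

-- ===== LEMMAS AND PROOFS =====

-- A's pair-of-appends loop is a pair of maps.
theorem foldl_pair_append {α β γ : Type} (g : α → β × γ) :
    ∀ (l : List α) (acc : List β × List γ),
      l.foldl (fun acc x => (acc.1 ++ [(g x).1], acc.2 ++ [(g x).2])) acc
        = (acc.1 ++ l.map (fun x => (g x).1), acc.2 ++ l.map (fun x => (g x).2)) := by
  intro l
  induction l with
  | nil => simp
  | cons x l ih => intro acc; simp [List.foldl_cons, ih]

-- A's 'for j in range(p, p+len(xs)): … lists[j] …' loop over pre ++ xs is a fold over enumerate xs p.
theorem foldl_range_index {β : Type} (f : β → Int → List Int → β) :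
    ∀ (xs pre : List (List Int)) (init : β),
      (PySem.List.pyRange (pre.length : Int) ((pre.length : Int) + xs.length) 1).foldl
          (fun acc j => f acc j (PySem.List.pyGetD (pre ++ xs) j [])) init
        = (PySem.List.enumerate xs (pre.length : Int)).foldl (fun acc p => f acc p.1 p.2) init := by
  intro xs
  induction xs with
  | nil => intro pre init; simp [PySem.List.pyRange_one_eq_nil, PySem.List.enumerate_nil]
  | cons r xs ih =>
    intro pre init
    have hlt : (pre.length : Int) < (pre.length : Int) + ((xs.length + 1 : Nat) : Int) := by
      push_cast; omega
    rw [show ((r :: xs).length : Int) = ((xs.length + 1 : Nat) : Int) by simp,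
        PySem.List.pyRange_one_cons hlt]
    simp only [List.foldl_cons, PySem.List.enumerate_cons]
    have hget : PySem.List.pyGetD (pre ++ r :: xs) (pre.length : Int) [] = r := by
      rw [PySem.List.pyGetD_natCast]
      simp [List.getD]
    rw [hget]
    have h2 := ih (pre ++ [r]) (f init (pre.length : Int) r)
    simp only [List.length_append, List.length_cons, List.length_nil, List.append_assoc,
      List.cons_append, List.nil_append, Nat.zero_add] at h2
    rw [show ((pre.length : Int) + ((xs.length + 1 : Nat) : Int)) = (((pre.length + 1 : Nat) : Int) + xs.length) by push_cast; ring,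
        show ((pre.length : Int) + 1) = ((pre.length + 1 : Nat) : Int) by push_cast; ring]
    exact h2

-- B's one row step, named for the invariant proofs.
def bstep (j : Int) (row : List Int) (best : List (Int × Int)) : List (Int × Int) :=
  (best.zip row).map (fun p => if p.2 < p.1.2 then (j, p.2) else p.1)

theorem bstep_length (j : Int) (row : List Int) (best : List (Int × Int))
    (h : best.length ≤ row.length) : (bstep j row best).length = best.length := by
  simp [bstep, List.length_zip]; omega

theorem bfold_length :
    ∀ (xs : List (List Int)) (s : Int) (best : List (Int × Int)),
      (∀ row ∈ xs, best.length ≤ row.length) →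
      ((PySem.List.enumerate xs s).foldl (fun b p => bstep p.1 p.2 b) best).length = best.length := by
  intro xs
  induction xs with
  | nil => intro s best _; simp [PySem.List.enumerate_nil]
  | cons r xs ih =>
    intro s best h
    simp only [PySem.List.enumerate_cons, List.foldl_cons]
    have hr : best.length ≤ r.length := h r (by simp)
    have hlen := bstep_length s r best hr
    rw [ih (s + 1) _ (by intro row hrow; rw [hlen]; exact h row (by simp [hrow])), hlen]

theorem bstep_getD (j : Int) (row : List Int) (best : List (Int × Int))
    (hr : best.length ≤ row.length) (i : Nat) (hi : i < best.length) (d : Int × Int) :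
    (bstep j row best).getD i d
      = (if row.getD i 0 < (best.getD i d).2 then (j, row.getD i 0) else best.getD i d) := by
  have h1 : i < (best.zip row).length := by simp [List.length_zip]; omega
  have h2 : i < row.length := by omega
  simp [bstep, List.getD_eq_getElem?_getD, List.getElem?_map, List.getElem?_eq_getElem h1,
    List.getElem?_eq_getElem hi, List.getElem?_eq_getElem h2, List.getElem_zip]

-- The key invariant: B's streamed state, read at column i, is A's per-column fold.
theorem bfold_getD :
    ∀ (xs : List (List Int)) (s : Int) (best : List (Int × Int)),
      (∀ row ∈ xs, best.length ≤ row.length) →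
      ∀ (i : Nat), i < best.length → ∀ (d : Int × Int),
      ((PySem.List.enumerate xs s).foldl (fun b p => bstep p.1 p.2 b) best).getD i d
        = (PySem.List.enumerate xs s).foldl
            (fun (acc : Int × Int) p =>
              if p.2.getD i 0 < acc.2 then (p.1, p.2.getD i 0) else acc) (best.getD i d) := by
  intro xs
  induction xs with
  | nil => intro s best _ i hi d; simp [PySem.List.enumerate_nil]
  | cons r xs ih =>
    intro s best h i hi d
    simp only [PySem.List.enumerate_cons, List.foldl_cons]
    have hr : best.length ≤ r.length := h r (by simp)
    have hlen := bstep_length s r best hr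
    rw [ih (s + 1) _ (by intro row hrow; rw [hlen]; exact h row (by simp [hrow])) i (by omega) d,
        bstep_getD s r best hr i hi d]

-- ===== VERDICT (by name: the statement is the Claim_ definition above) =====
theorem find_min_bro_spec : Claim_equal_find_min_bro := by
  intro lists _ hpre
  obtain ⟨hne, hrows⟩ := hpre
  obtain ⟨r0, rest, rfl⟩ : ∃ r0 rest, lists = r0 :: rest := by
    cases lists with
    | nil => exact absurd rfl hne
    | cons a l => exact ⟨a, l, rfl⟩
  simp only [List.headD_cons] at hrows
  unfold Spec_find_min_bro
  simp only [find_min_bro, find_min_bro_alt]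
  have hget0 : PySem.List.pyGetD (r0 :: rest) 0 [] = r0 := by
    simp [PySem.List.pyGetD_ofNat']
  rw [hget0]
  -- A side: range over columns → map; inner range loop → enumerate-fold
  rw [PySem.List.pyRange_zero_nat]
  rw [foldl_pair_append (fun i => (PySem.List.pyRange 1 ((r0 :: rest).length : Int) 1).foldl
      (fun (s : Int × Int) j =>
        if PySem.List.pyGetD (PySem.List.pyGetD (r0 :: rest) j []) i 0 < s.2 then
          (j, PySem.List.pyGetD (PySem.List.pyGetD (r0 :: rest) j []) i 0)
        else s) (0, PySem.List.pyGetD r0 i 0))]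
  -- B side: slice is drop 1 = rest
  have hslice : PySem.List.slice (r0 :: rest) (some 1) none = rest := by
    simp [PySem.List.slice_some_none, PySem.List.clampIdx]
  rw [hslice]
  simp only [List.nil_append]
  -- name B's final state
  have hlen0 : (r0.map (fun v => ((0 : Int), v))).length = r0.length := by simp
  have hrows' : ∀ row ∈ rest, (r0.map (fun v => ((0 : Int), v))).length ≤ row.length := by
    intro row hrow; rw [hlen0]; exact hrows row (by simp [hrow])
  have hblen := bfold_length rest 1 _ hrows'
  rw [hlen0] at hblen
  -- the two components, elementwise
  have hcol : ∀ (i : Nat), i < r0.length →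
      ((PySem.List.enumerate rest 1).foldl (fun b p => bstep p.1 p.2 b)
          (r0.map (fun v => ((0 : Int), v)))).getD i (0, 0)
        = (PySem.List.pyRange 1 ((r0 :: rest).length : Int) 1).foldl
            (fun (s : Int × Int) j =>
              if PySem.List.pyGetD (PySem.List.pyGetD (r0 :: rest) j []) (i : Int) 0 < s.2 then
                (j, PySem.List.pyGetD (PySem.List.pyGetD (r0 :: rest) j []) (i : Int) 0)
              else s) (0, PySem.List.pyGetD r0 (i : Int) 0) := by
    intro i hi
    rw [bfold_getD rest 1 _ hrows' i (by omega) (0, 0)]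
    have hA := foldl_range_index
      (f := fun (acc : Int × Int) (j : Int) (row : List Int) =>
        if row.getD i 0 < acc.2 then (j, row.getD i 0) else acc)
      rest [r0] (0, PySem.List.pyGetD r0 (i : Int) 0)
    simp only [List.length_cons, List.length_nil, Nat.zero_add, List.cons_append,
      List.nil_append, Nat.cast_one] at hA
    rw [show ((r0 :: rest).length : Int) = 1 + (rest.length : Int) by simp; omega]
    have hbody : (fun (acc : Int × Int) (j : Int) =>
        if PySem.List.pyGetD (PySem.List.pyGetD (r0 :: rest) j []) (i : Int) 0 < acc.2 then
          (j, PySem.List.pyGetD (PySem.List.pyGetD (r0 :: rest) j []) (i : Int) 0)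
        else acc)
        = (fun (acc : Int × Int) (j : Int) =>
          (fun (acc : Int × Int) (j : Int) (row : List Int) =>
            if row.getD i 0 < acc.2 then (j, row.getD i 0) else acc) acc j
            (PySem.List.pyGetD (r0 :: rest) j [])) := by
      funext acc j; simp [PySem.List.pyGetD_natCast]
    rw [hbody, hA]
    congr 1
    simp [PySem.List.pyGetD_natCast, List.getD_eq_getElem?_getD, List.getElem?_map,
      List.getElem?_eq_getElem hi]
  rw [show (fun (best : List (Int × Int)) (jr : Int × List Int) =>
        List.map (fun p => if p.2 < p.1.2 then (jr.1, p.2) else p.1) (best.zip jr.2))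
      = (fun (b : List (Int × Int)) (p : Int × List Int) => bstep p.1 p.2 b) from rfl]
  refine Prod.ext ?_ ?_ <;>
  · apply List.ext_getElem (by simp [hblen])
    intro i h1 h2
    have hi : i < r0.length := by simpa using h1
    have hc := hcol i hi
    rw [List.getD_eq_getElem?_getD, List.getElem?_eq_getElem (by omega : i < _)] at hc
    simp only [List.getElem_map, List.getElem_range]
    rw [← hc]
    simp
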